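-- pv_equiv track=rewrite | github.com/OpenBMB/OmniEvalKit | o_e_Kit/utils/metrics/wer_eval.py | get_error_stats
-- ===== SOURCE A (Python) =====
-- def get_error_stats(ref, hyp, compute_cer=False):
--     """
--     Computes word/character error statistics using Levenshtein distance.
--     """
--     ref_tokens = ref.split() if not compute_cer else list(ref)
--     hyp_tokens = hyp.split() if not compute_cer else list(hyp)
--
--     dp = [[0] * (len(hyp_tokens) + 1) for _ in range(len(ref_tokens) + 1)]
--     ops = [[(0, 0, 0)] * (len(hyp_tokens) + 1) for _ in range(len(ref_tokens) + 1)]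
--
--     for i in range(len(ref_tokens) + 1):
--         dp[i][0] = i
--         ops[i][0] = (0, i, 0)
--     for j in range(len(hyp_tokens) + 1):
--         dp[0][j] = j
--         ops[0][j] = (0, 0, j)
--
--     for i in range(1, len(ref_tokens) + 1):
--         for j in range(1, len(hyp_tokens) + 1):
--             subs_cost = 0 if ref_tokens[i - 1] == hyp_tokens[j - 1] else 1
--
--             sub_err, del_err, ins_err = ops[i - 1][j - 1]
--             substitution = (dp[i-1][j-1] + subs_cost, sub_err + subs_cost, del_err, ins_err)
--
--             sub_err, del_err, ins_err = ops[i - 1][j]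
--             deletion = (dp[i-1][j] + 1, sub_err, del_err + 1, ins_err)
--
--             sub_err, del_err, ins_err = ops[i][j-1]
--             insertion = (dp[i][j-1] + 1, sub_err, del_err, ins_err + 1)
--
--             dp[i][j], s, d, i_ = min(substitution, deletion, insertion, key=lambda x: x[0])
--             ops[i][j] = (s, d, i_)
--
--     _, (subs, dels, ins) = dp[-1][-1], ops[-1][-1]
--     return subs, dels, ins, len(ref_tokens)
-- ===== SOURCE B (Python) =====
-- def get_error_stats(ref, hyp, compute_cer=False):
--     """
--     Computes word/character error statistics using Levenshtein distance.
--
--     Builds only the standard dp table in the forward pass, then recovers the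
--     substitution/deletion/insertion breakdown with a backtrace that tests
--     predecessors in the forward tie-break priority (sub, then del, then ins).
--     """
--     ref_tokens = ref.split() if not compute_cer else list(ref)
--     hyp_tokens = hyp.split() if not compute_cer else list(hyp)
--     m, n = len(ref_tokens), len(hyp_tokens)
--
--     dp = [list(range(n + 1))]
--     for i in range(1, m + 1):
--         prev = dp[-1]
--         row = [i]
--         for j in range(1, n + 1):
--             c = 0 if ref_tokens[i - 1] == hyp_tokens[j - 1] else 1
--             row.append(min(prev[j - 1] + c, prev[j] + 1, row[j - 1] + 1))
--         dp.append(row)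
--
--     subs = dels = ins = 0
--     i, j = m, n
--     while i > 0 and j > 0:
--         c = 0 if ref_tokens[i - 1] == hyp_tokens[j - 1] else 1
--         if dp[i][j] == dp[i - 1][j - 1] + c:
--             subs += c
--             i, j = i - 1, j - 1
--         elif dp[i][j] == dp[i - 1][j] + 1:
--             dels += 1
--             i -= 1
--         else:
--             ins += 1
--             j -= 1
--     dels += i
--     ins += j
--     return subs, dels, ins, m
-- ===== Notes on version B (the rewrite author's own statement) =====
-- stated objective: alternative
-- what changed: Drops A's parallel per-cell (subs,dels,ins) ops table: B fills only the plain Levenshtein dp table and then reconstructs the breakdown with a single backtrace pass that tests predecessors in the forward tie-break priority (substitution, deletion, insertion).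
import Mathlib
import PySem

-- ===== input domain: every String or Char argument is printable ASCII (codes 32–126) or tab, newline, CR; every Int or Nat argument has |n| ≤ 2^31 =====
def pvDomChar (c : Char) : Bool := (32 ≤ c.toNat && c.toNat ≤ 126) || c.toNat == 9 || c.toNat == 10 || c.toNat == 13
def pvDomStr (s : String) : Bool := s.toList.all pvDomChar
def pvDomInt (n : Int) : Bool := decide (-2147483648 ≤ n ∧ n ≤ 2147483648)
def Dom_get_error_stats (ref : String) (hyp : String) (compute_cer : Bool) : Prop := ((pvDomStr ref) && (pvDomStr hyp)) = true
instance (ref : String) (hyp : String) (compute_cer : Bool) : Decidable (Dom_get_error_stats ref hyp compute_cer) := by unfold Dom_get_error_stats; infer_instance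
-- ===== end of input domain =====

-- B replaces A's parallel per-cell ops table by a dp-only forward pass plus a backtrace
-- reconstructing the (subs,dels,ins) breakdown; same O(m*n) cost, different decomposition.

-- ===== PORT A =====
-- tokenization shared by both Pythons: ref.split() if not compute_cer else list(ref)
def pvTok (s : String) (cer : Bool) : List String :=
  if cer then s.toList.map (fun c => String.mk [c]) else PySem.Str.split₀ s

-- one inner-loop body of A: cells carry (dp, sub_err, del_err, ins_err);
-- Python's min(substitution, deletion, insertion, key=x[0]) returns the FIRST tuple with
-- the minimal key, i.e. substitution iff its key is ≤ both others, else deletion iff ≤ insertion.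
def pvACell (rt ht : String) (d u l : Int × Int × Int × Int) : Int × Int × Int × Int :=
  let c : Int := if rt == ht then 0 else 1
  if d.1 + c ≤ u.1 + 1 ∧ d.1 + c ≤ l.1 + 1 then (d.1 + c, d.2.1 + c, d.2.2.1, d.2.2.2)
  else if u.1 + 1 ≤ l.1 + 1 then (u.1 + 1, u.2.1, u.2.2.1 + 1, u.2.2.2)
  else (l.1 + 1, l.2.1, l.2.2.1, l.2.2.2 + 1)

-- the inner j-loop: walk the previous row (d = dp[i-1][j-1], u = dp[i-1][j]) and the
-- hyp tokens, carrying the last computed cell of the current row (l = dp[i][j-1])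
def pvARow (rt : String) : List (Int × Int × Int × Int) → List String →
    (Int × Int × Int × Int) → List (Int × Int × Int × Int)
  | d :: u :: rest, h :: hs, l =>
      let c := pvACell rt h d u l
      c :: pvARow rt (u :: rest) hs c
  | _, _, _ => []

-- the outer i-loop: one row per ref token, first column = (i, 0, i, 0)
def pvALoop (H : List String) : List String → List (Int × Int × Int × Int) → Int →
    List (Int × Int × Int × Int)
  | [], prev, _ => prev
  | r :: rs, prev, i =>
      let first : Int × Int × Int × Int := (i, 0, i, 0)
      pvALoop H rs (first :: pvARow r prev H first) (i + 1)

def get_error_stats (ref : String) (hyp : String) (compute_cer : Bool) : Int × Int × Int × Int :=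
  let R := pvTok ref compute_cer
  let H := pvTok hyp compute_cer
  -- after the two init loops row 0 is dp[0][j] = j, ops[0][j] = (0,0,j)
  let row0 := (List.range (H.length + 1)).map (fun j => (Int.ofNat j, (0 : Int), (0 : Int), Int.ofNat j))
  let last := pvALoop H R row0 1
  let fin := last.getLastD (0, 0, 0, 0)   -- ops[-1][-1]; the row is never empty
  (fin.2.1, fin.2.2.1, fin.2.2.2, (R.length : Int))

-- ===== PORT B =====
-- inner loop of B's forward pass: plain dp values only, min(prev[j-1]+c, prev[j]+1, row[j-1]+1)
def pvBRow (rt : String) : List Int → List String → Int → List Int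
  | p0 :: p1 :: rest, h :: hs, l =>
      let c : Int := if rt == h then 0 else 1
      let v := min (min (p0 + c) (p1 + 1)) (l + 1)
      v :: pvBRow rt (p1 :: rest) hs v
  | _, _, _ => []

def pvBRows (H : List String) : List String → List Int → Int → List (List Int)
  | [], prev, _ => [prev]
  | r :: rs, prev, i => prev :: pvBRows H rs (i :: pvBRow r prev H i) (i + 1)

def pvAt (dp : List (List Int)) (i j : Nat) : Int := (dp.getD i []).getD j 0

-- the backtrace while-loop, as a recursion on (i, j); the two trailing accumulations
-- dels += i / ins += j of Source B are the base cases
def pvBT (dp : List (List Int)) (R H : List String) : Nat → Nat → Int × Int × Int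
  | 0, j => (0, 0, (j : Int))
  | i + 1, 0 => (0, (i : Int) + 1, 0)
  | i + 1, j + 1 =>
      let c : Int := if R.getD i "" == H.getD j "" then 0 else 1
      if pvAt dp (i + 1) (j + 1) == pvAt dp i j + c then
        let p := pvBT dp R H i j
        (p.1 + c, p.2.1, p.2.2)
      else if pvAt dp (i + 1) (j + 1) == pvAt dp i (j + 1) + 1 then
        let p := pvBT dp R H i (j + 1)
        (p.1, p.2.1 + 1, p.2.2)
      else
        let p := pvBT dp R H (i + 1) j
        (p.1, p.2.1, p.2.2 + 1)
  termination_by i j => i + j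

def get_error_stats_alt (ref : String) (hyp : String) (compute_cer : Bool) : Int × Int × Int × Int :=
  let R := pvTok ref compute_cer
  let H := pvTok hyp compute_cer
  let row0 := (List.range (H.length + 1)).map (fun j => Int.ofNat j)
  let dp := pvBRows H R row0 1
  let t := pvBT dp R H R.length H.length
  (t.1, t.2.1, t.2.2, (R.length : Int))

-- ===== PRECONDITION & SPEC =====
def Spec_get_error_stats (ref : String) (hyp : String) (compute_cer : Bool) (out : Int × Int × Int × Int) : Prop := out = get_error_stats_alt ref hyp compute_cer
instance (ref : String) (hyp : String) (compute_cer : Bool) (out : Int × Int × Int × Int) : Decidable (Spec_get_error_stats ref hyp compute_cer out) := by unfold Spec_get_error_stats; infer_instance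

-- ===== CLAIM (what is proved, stated in full; the proofs are below) =====
def Claim_equal_get_error_stats : Prop := ∀ (ref : String) (hyp : String) (compute_cer : Bool), Dom_get_error_stats ref hyp compute_cer → Spec_get_error_stats ref hyp compute_cer (get_error_stats ref hyp compute_cer)

-- ===== LEMMAS AND PROOFS =====

-- the reference grid: cell (i, j) of A's joint (dp, subs, dels, ins) table
def cF (R H : List String) : Nat → Nat → Int × Int × Int × Int
  | 0, j => ((j : Int), 0, 0, (j : Int))
  | i + 1, 0 => ((i : Int) + 1, 0, (i : Int) + 1, 0)
  | i + 1, j + 1 =>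
      pvACell (R.getD i "") (H.getD j "") (cF R H i j) (cF R H i (j + 1)) (cF R H (i + 1) j)
  termination_by i j => i + j

lemma pvACell_fst (rt ht : String) (d u l : Int × Int × Int × Int) :
    (pvACell rt ht d u l).1 =
      min (min (d.1 + (if rt == ht then (0 : Int) else 1)) (u.1 + 1)) (l.1 + 1) := by
  simp only [pvACell]
  split_ifs <;> simp <;> omega

lemma pvARow_nil (rt : String) (p : List (Int × Int × Int × Int)) (l : Int × Int × Int × Int) :
    pvARow rt p [] l = [] := by
  cases p with
  | nil => rfl
  | cons a t => cases t <;> rfl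

lemma pvBRow_nil (rt : String) (p : List Int) (l : Int) : pvBRow rt p [] l = [] := by
  cases p with
  | nil => rfl
  | cons a t => cases t <;> rfl

lemma pvARow_eq (R H : List String) (i : Nat) :
    ∀ (k j0 : Nat), j0 + k = H.length →
      pvARow (R.getD i "") ((List.range' j0 (k + 1)).map (cF R H i)) (H.drop j0)
        (cF R H (i + 1) j0)
      = (List.range' (j0 + 1) k).map (cF R H (i + 1)) := by
  intro k
  induction k with
  | zero =>
      intro j0 h
      have : H.drop j0 = [] := by
        apply List.drop_eq_nil_of_le; omega
      simp [this, pvARow_nil]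
  | succ k ih =>
      intro j0 h
      have hj : j0 < H.length := by omega
      have hdrop : H.drop j0 = H[j0] :: H.drop (j0 + 1) := List.drop_eq_getElem_cons hj
      have hget : H.getD j0 "" = H[j0] := by
        simp [List.getD, List.getElem?_eq_getElem hj]
      rw [List.range'_succ, List.range'_succ, hdrop]
      simp only [List.map_cons]
      rw [show pvARow (R.getD i "") (cF R H i j0 :: cF R H i (j0+1) :: (List.range' (j0+2) k).map (cF R H i)) (H[j0] :: H.drop (j0+1)) (cF R H (i+1) j0) = (pvACell (R.getD i "") H[j0] (cF R H i j0) (cF R H i (j0+1)) (cF R H (i+1) j0)) :: pvARow (R.getD i "") (cF R H i (j0+1) :: (List.range' (j0+2) k).map (cF R H i)) (H.drop (j0+1)) (pvACell (R.getD i "") H[j0] (cF R H i j0) (cF R H i (j0+1)) (cF R H (i+1) j0)) from rfl]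
      have hcf : pvACell (R.getD i "") H[j0] (cF R H i j0) (cF R H i (j0+1)) (cF R H (i+1) j0)
          = cF R H (i + 1) (j0 + 1) := by
        rw [cF, hget]
      rw [hcf]
      congr 1
      have h2 := ih (j0 + 1) (by omega)
      rw [List.range'_succ, List.map_cons] at h2
      exact h2

lemma pvALoop_eq (R H : List String) :
    ∀ (t k : Nat), k + t = R.length →
      pvALoop H (R.drop k) ((List.range' 0 (H.length + 1)).map (cF R H k)) ((k : Int) + 1)
      = (List.range' 0 (H.length + 1)).map (cF R H R.length) := by
  intro t
  induction t with
  | zero =>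
      intro k h
      have hk : k = R.length := by omega
      subst hk
      simp [List.drop_length, pvALoop]
  | succ t ih =>
      intro k h
      have hk : k < R.length := by omega
      have hdrop : R.drop k = R[k] :: R.drop (k + 1) := List.drop_eq_getElem_cons hk
      have hget : R.getD k "" = R[k] := by
        simp [List.getD, List.getElem?_eq_getElem hk]
      rw [hdrop]
      show pvALoop H (R.drop (k+1))
          ((((k : Int) + 1, (0:Int), (k : Int) + 1, (0:Int))) ::
            pvARow R[k] ((List.range' 0 (H.length + 1)).map (cF R H k)) H
              (((k : Int) + 1, 0, (k : Int) + 1, 0)) ) ((k : Int) + 1 + 1)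
        = (List.range' 0 (H.length + 1)).map (cF R H R.length)
      have hfirst : (((k : Int) + 1, (0:Int), (k : Int) + 1, (0:Int)) : Int × Int × Int × Int)
          = cF R H (k + 1) 0 := by
        rw [cF]
      have hrow := pvARow_eq R H k H.length 0 (by omega)
      rw [List.drop_zero, hget] at hrow
      rw [hfirst, hrow]
      have : cF R H (k + 1) 0 :: (List.range' (0 + 1) H.length).map (cF R H (k + 1))
          = (List.range' 0 (H.length + 1)).map (cF R H (k + 1)) := by
        rw [List.range'_succ, List.map_cons]
      rw [this]
      have hcast : ((k : Int) + 1 + 1) = ((k + 1 : Nat) : Int) + 1 := by push_cast; ring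
      rw [hcast]
      exact ih (k + 1) (by omega)

lemma pvBRow_eq (R H : List String) (i : Nat) :
    ∀ (k j0 : Nat), j0 + k = H.length →
      pvBRow (R.getD i "") ((List.range' j0 (k + 1)).map (fun j => (cF R H i j).1)) (H.drop j0)
        ((cF R H (i + 1) j0).1)
      = (List.range' (j0 + 1) k).map (fun j => (cF R H (i + 1) j).1) := by
  intro k
  induction k with
  | zero =>
      intro j0 h
      have : H.drop j0 = [] := by
        apply List.drop_eq_nil_of_le; omega
      simp [this, pvBRow_nil]
  | succ k ih =>
      intro j0 h
      have hj : j0 < H.length := by omega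
      have hdrop : H.drop j0 = H[j0] :: H.drop (j0 + 1) := List.drop_eq_getElem_cons hj
      have hget : H.getD j0 "" = H[j0] := by
        simp [List.getD, List.getElem?_eq_getElem hj]
      rw [List.range'_succ, List.range'_succ, hdrop]
      simp only [List.map_cons]
      rw [show pvBRow (R.getD i "") ((cF R H i j0).1 :: (cF R H i (j0+1)).1 :: (List.range' (j0+2) k).map (fun j => (cF R H i j).1)) (H[j0] :: H.drop (j0+1)) ((cF R H (i+1) j0).1) = (min (min ((cF R H i j0).1 + (if R.getD i "" == H[j0] then (0:Int) else 1)) ((cF R H i (j0+1)).1 + 1)) ((cF R H (i+1) j0).1 + 1)) :: pvBRow (R.getD i "") ((cF R H i (j0+1)).1 :: (List.range' (j0+2) k).map (fun j => (cF R H i j).1)) (H.drop (j0+1)) (min (min ((cF R H i j0).1 + (if R.getD i "" == H[j0] then (0:Int) else 1)) ((cF R H i (j0+1)).1 + 1)) ((cF R H (i+1) j0).1 + 1)) from rfl]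
      have hv : min (min ((cF R H i j0).1 + (if R.getD i "" == H[j0] then (0:Int) else 1)) ((cF R H i (j0+1)).1 + 1)) ((cF R H (i+1) j0).1 + 1)
          = (cF R H (i + 1) (j0 + 1)).1 := by
        rw [cF, hget, pvACell_fst]
      rw [hv]
      congr 1
      have h2 := ih (j0 + 1) (by omega)
      rw [List.range'_succ, List.map_cons] at h2
      exact h2

lemma pvBRows_eq (R H : List String) :
    ∀ (t k : Nat), k + t = R.length →
      pvBRows H (R.drop k) ((List.range' 0 (H.length + 1)).map (fun j => (cF R H k j).1)) ((k : Int) + 1)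
      = (List.range' k (t + 1)).map (fun i => (List.range' 0 (H.length + 1)).map (fun j => (cF R H i j).1)) := by
  intro t
  induction t with
  | zero =>
      intro k h
      have hk : k = R.length := by omega
      subst hk
      simp [List.drop_length, pvBRows, List.range'_succ]
  | succ t ih =>
      intro k h
      have hk : k < R.length := by omega
      have hdrop : R.drop k = R[k] :: R.drop (k + 1) := List.drop_eq_getElem_cons hk
      have hget : R.getD k "" = R[k] := by
        simp [List.getD, List.getElem?_eq_getElem hk]
      rw [hdrop]
      show ((List.range' 0 (H.length + 1)).map (fun j => (cF R H k j).1)) ::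
          pvBRows H (R.drop (k + 1))
            (((k : Int) + 1) :: pvBRow R[k] ((List.range' 0 (H.length + 1)).map (fun j => (cF R H k j).1)) H ((k : Int) + 1))
            ((k : Int) + 1 + 1)
        = _
      have hfirst : (cF R H (k + 1) 0).1 = ((k : Int) + 1) := by rw [cF]
      have hrow := pvBRow_eq R H k H.length 0 (by omega)
      rw [List.drop_zero, hget, hfirst] at hrow
      rw [hrow]
      have hjoin : ((k : Int) + 1) :: (List.range' (0 + 1) H.length).map (fun j => (cF R H (k + 1) j).1)
          = (List.range' 0 (H.length + 1)).map (fun j => (cF R H (k + 1) j).1) := by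
        rw [List.range'_succ, List.map_cons, hfirst]
      rw [hjoin]
      have hcast : ((k : Int) + 1 + 1) = ((k + 1 : Nat) : Int) + 1 := by push_cast; ring
      rw [hcast, ih (k + 1) (by omega)]
      rw [show List.range' k (t + 1 + 1) = k :: List.range' (k + 1) (t + 1) from by
        rw [List.range'_succ]]
      rw [List.map_cons]

lemma pvAt_table (R H : List String) (i j : Nat) (hi : i ≤ R.length) (hj : j ≤ H.length) :
    pvAt ((List.range' 0 (R.length + 1)).map
        (fun i => (List.range' 0 (H.length + 1)).map (fun j => (cF R H i j).1))) i j
      = (cF R H i j).1 := by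
  unfold pvAt
  have h1 : ((List.range' 0 (R.length + 1)).map
      (fun i => (List.range' 0 (H.length + 1)).map (fun j => (cF R H i j).1))).getD i []
      = (List.range' 0 (H.length + 1)).map (fun j => (cF R H i j).1) := by
    simp [List.getD, List.getElem?_map, List.getElem?_range', Nat.lt_succ_of_le hi]
  rw [h1]
  simp [List.getD, List.getElem?_map, List.getElem?_range', Nat.lt_succ_of_le hj]

-- the backtrace reproduces A's per-cell ops, because the forward min's tie-break
-- (substitution first, then deletion, then insertion) is exactly what the tests recover
lemma pvBT_eq (R H : List String) (dp : List (List Int))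
    (hdp : ∀ i j, i ≤ R.length → j ≤ H.length → pvAt dp i j = (cF R H i j).1) :
    ∀ (N i j : Nat), i + j ≤ N → i ≤ R.length → j ≤ H.length →
      pvBT dp R H i j = ((cF R H i j).2.1, (cF R H i j).2.2.1, (cF R H i j).2.2.2) := by
  intro N
  induction N with
  | zero =>
      intro i j hN hi hj
      have : i = 0 ∧ j = 0 := by omega
      obtain ⟨h1, h2⟩ := this
      subst h1; subst h2
      rw [pvBT, cF]
  | succ N ih =>
      intro i j hN hi hj
      match i, j with
      | 0, j => rw [pvBT, cF]
      | i + 1, 0 => rw [pvBT, cF]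
      | i + 1, j + 1 =>
          have hi' : i < R.length := by omega
          have hj' : j < H.length := by omega
          set c : Int := if R.getD i "" == H.getD j "" then (0 : Int) else 1 with hc
          have hd := hdp i j (by omega) (by omega)
          have hu := hdp i (j + 1) (by omega) (by omega)
          have hl := hdp (i + 1) j (by omega) (by omega)
          have hcur := hdp (i + 1) (j + 1) (by omega) (by omega)
          set d := cF R H i j with hdd
          set u := cF R H i (j + 1) with huu
          set l := cF R H (i + 1) j with hll
          have hcell : cF R H (i + 1) (j + 1) = pvACell (R.getD i "") (H.getD j "") d u l := by
            rw [cF]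
          rw [pvBT]
          simp only [← hc, hd, hu, hl, hcur, hcell]
          by_cases h1 : d.1 + c ≤ u.1 + 1 ∧ d.1 + c ≤ l.1 + 1
          · have hval : pvACell (R.getD i "") (H.getD j "") d u l
                = (d.1 + c, d.2.1 + c, d.2.2.1, d.2.2.2) := by
              simp only [pvACell, ← hc]
              rw [if_pos h1]
            rw [hval]
            rw [if_pos (show ((d.1 + c == d.1 + c) = true) by simp)]
            rw [ih i j (by omega) (by omega) (by omega)]
          · have hmin : (pvACell (R.getD i "") (H.getD j "") d u l).1 ≠ d.1 + c := by
              rw [pvACell_fst, ← hc]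
              omega
            by_cases h2 : u.1 + 1 ≤ l.1 + 1
            · have hval : pvACell (R.getD i "") (H.getD j "") d u l
                  = (u.1 + 1, u.2.1, u.2.2.1 + 1, u.2.2.2) := by
                simp only [pvACell, ← hc]
                rw [if_neg h1, if_pos h2]
              rw [hval] at hmin ⊢
              simp only at hmin
              rw [if_neg (by simpa using hmin)]
              rw [if_pos (show ((u.1 + 1 == u.1 + 1) = true) by simp)]
              rw [ih i (j + 1) (by omega) (by omega) (by omega)]
            · have hval : pvACell (R.getD i "") (H.getD j "") d u l
                  = (l.1 + 1, l.2.1, l.2.2.1, l.2.2.2 + 1) := by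
                simp only [pvACell, ← hc]
                rw [if_neg h1, if_neg h2]
              rw [hval] at hmin ⊢
              simp only at hmin
              rw [if_neg (by simpa using hmin)]
              rw [if_neg (show ¬ ((l.1 + 1 == u.1 + 1) = true) by simp; omega)]
              rw [ih (i + 1) j (by omega) (by omega) (by omega)]

lemma getLastD_map_range' (f : Nat → Int × Int × Int × Int) (n : Nat) :
    ((List.range' 0 (n + 1)).map f).getLastD (0, 0, 0, 0) = f n := by
  rw [List.range'_concat, List.map_append]
  simp

-- ===== VERDICT (by name: the statement is the Claim_ definition above) =====
theorem get_error_stats_spec : Claim_equal_get_error_stats := by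
  unfold Claim_equal_get_error_stats Spec_get_error_stats
  intro ref hyp cer _
  simp only [get_error_stats, get_error_stats_alt]
  set R := pvTok ref cer with hR
  set H := pvTok hyp cer with hH
  have hrow0A : (List.range (H.length + 1)).map (fun j => (Int.ofNat j, (0 : Int), (0 : Int), Int.ofNat j))
      = (List.range' 0 (H.length + 1)).map (cF R H 0) := by
    rw [List.range_eq_range']
    refine List.map_congr_left fun j _ => ?_
    simp [cF]
  have hrow0B : (List.range (H.length + 1)).map (fun j => Int.ofNat j)
      = (List.range' 0 (H.length + 1)).map (fun j => (cF R H 0 j).1) := by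
    rw [List.range_eq_range']
    refine List.map_congr_left fun j _ => ?_
    simp [cF]
  have hA : pvALoop H R ((List.range' 0 (H.length + 1)).map (cF R H 0)) 1
      = (List.range' 0 (H.length + 1)).map (cF R H R.length) := by
    have := pvALoop_eq R H R.length 0 (by omega)
    simpa using this
  have hB : pvBRows H R ((List.range' 0 (H.length + 1)).map (fun j => (cF R H 0 j).1)) 1
      = (List.range' 0 (R.length + 1)).map
          (fun i => (List.range' 0 (H.length + 1)).map (fun j => (cF R H i j).1)) := by
    have := pvBRows_eq R H R.length 0 (by omega)
    simpa using this
  rw [hrow0A, hrow0B, hA, hB, getLastD_map_range']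
  rw [pvBT_eq R H _ (fun i j hi hj => pvAt_table R H i j hi hj)
      (R.length + H.length) R.length H.length (by omega) le_rfl le_rfl]
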